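-- pv_equiv track=rewrite | github.com/akohen/AdventOfCode | aoc_2022/day15.py | phase1
-- ===== SOURCE A (Python) =====
-- def get_distance(point_1, point_2):
--     return abs(point_1[0]-point_2[0]) + abs(point_1[1]-point_2[1])
--
-- def phase1(data, y=10):
--     sensors, beacons = {}, set()
--     for sx,sy,bx,by in data:
--         distance = get_distance((sx,sy),(bx,by))
--         sensors[(sx,sy)] = distance
--         beacons.add((bx,by))
--
--     result, segments = 0, []
--     # |Sx-x| + |Sy-y| < D   <=>   x = [Sx-D+|Sy-y|; Sx+D-|Sy-y|]
--     for (sx,sy), d in sensors.items():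
--         segment = [sx - d + abs(sy-y), sx + d - abs(sy-y)]
--         if segment[0] <= segment[1]:
--             segments.append(segment)
--
--     result, current = 0, []
--     for a, b in sorted(segments):
--         if not current:
--             current = [a, b]
--         elif a > current[1]:
--             result += current[1] - current[0] + 1
--             current = [a, b]
--         elif b > current[1]:
--             current[1] = b
--     result += current[1] - current[0] + 1
--
--     for bx, by in beacons:
--         if by == y:
--             result -= 1
--     return result
-- ===== SOURCE B (Python) =====
-- def phase1(data, y=10):
--     sensors, beacons = {}, set()
--     for sx, sy, bx, by in data:
--         sensors[(sx, sy)] = abs(sx - bx) + abs(sy - by)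
--         beacons.add((bx, by))
--
--     # event sweep instead of sort-and-merge: open at a, close at b+1
--     events = []
--     for (sx, sy), d in sensors.items():
--         r = d - abs(sy - y)
--         if r >= 0:
--             events.append((sx - r, 1))
--             events.append((sx + r + 1, -1))
--
--     result, active, open_x = 0, 0, 0
--     for x, delta in sorted(events):
--         if active == 0:
--             open_x = x
--         active += delta
--         if active == 0:
--             result += x - open_x
--
--     return result - sum(1 for _, by in beacons if by == y)
-- ===== Notes on version B (the rewrite author's own statement) =====
-- stated objective: alternative
-- what changed: A sorts the per-sensor segments and merges overlapping intervals with a mutable current interval; B instead emits (start,+1)/(end+1,-1) events per segment, sorts the events, and sweeps them accumulating an active count, adding the covered length each time the count returns to zero.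
import Mathlib
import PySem

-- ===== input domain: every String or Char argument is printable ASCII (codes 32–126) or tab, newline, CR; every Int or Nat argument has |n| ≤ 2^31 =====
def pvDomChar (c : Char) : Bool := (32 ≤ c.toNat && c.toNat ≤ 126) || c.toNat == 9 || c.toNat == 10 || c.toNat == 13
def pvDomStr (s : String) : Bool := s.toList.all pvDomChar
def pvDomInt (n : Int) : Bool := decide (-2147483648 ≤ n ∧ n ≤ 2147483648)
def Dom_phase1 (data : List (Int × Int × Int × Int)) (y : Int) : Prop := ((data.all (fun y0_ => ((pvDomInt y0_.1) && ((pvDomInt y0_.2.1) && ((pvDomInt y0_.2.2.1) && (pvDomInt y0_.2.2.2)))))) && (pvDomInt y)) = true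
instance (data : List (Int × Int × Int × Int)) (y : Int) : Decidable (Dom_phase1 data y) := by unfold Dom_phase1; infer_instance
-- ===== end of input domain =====

-- B replaces A's sort-and-merge interval loop by an open/close event sweep; same cost, different algorithm (objective: alternative).

-- ===== PORT A =====
def getDistance (p q : Int × Int) : Int := |p.1 - q.1| + |p.2 - q.2|

def pvSensorStep (st : PySem.Dict (Int × Int) Int × PySem.Set (Int × Int))
    (e : Int × Int × Int × Int) : PySem.Dict (Int × Int) Int × PySem.Set (Int × Int) :=
  let (sx, sy, bx, b_y) := e
  (st.1.insert (sx, sy) (getDistance (sx, sy) (bx, b_y)), PySem.Set.add st.2 (bx, b_y))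

def pvSegStep (y : Int) (acc : List (Int × Int)) (p : (Int × Int) × Int) : List (Int × Int) :=
  let sx := p.1.1
  let sy := p.1.2
  let d := p.2
  let a := sx - d + |sy - y|
  let b := sx + d - |sy - y|
  if a ≤ b then acc ++ [(a, b)] else acc

def pvMStep (st : Int × Option (Int × Int)) (q : Int × Int) : Int × Option (Int × Int) :=
  match st.2 with
  | none => (st.1, some q)
  | some c =>
      if c.2 < q.1 then (st.1 + (c.2 - c.1 + 1), some q)
      else if c.2 < q.2 then (st.1, some (c.1, q.2))
      else st

def pvFinish (m : Int × Option (Int × Int)) : Int :=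
  match m.2 with
  | none => 0   -- Python raises IndexError here (no segment); such inputs are outside Pre_phase1
  | some c => m.1 + (c.2 - c.1 + 1)

def phase1 (data : List (Int × Int × Int × Int)) (y : Int) : Int :=
  let sb := data.foldl pvSensorStep (PySem.Dict.empty, PySem.Set.empty)
  let segments := sb.1.items.foldl (pvSegStep y) []
  let m := (PySem.List.sorted2 segments Prod.fst Prod.snd).foldl pvMStep (0, none)
  let result : Int := pvFinish m
  sb.2.foldl (fun r p => if p.2 = y then r - 1 else r) result

-- ===== PORT B =====
def pvSensorStepB (st : PySem.Dict (Int × Int) Int × PySem.Set (Int × Int))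
    (e : Int × Int × Int × Int) : PySem.Dict (Int × Int) Int × PySem.Set (Int × Int) :=
  let (sx, sy, bx, b_y) := e
  (st.1.insert (sx, sy) (abs (sx - bx) + abs (sy - b_y)), PySem.Set.add st.2 (bx, b_y))

def pvEvStep (y : Int) (acc : List (Int × Int)) (p : (Int × Int) × Int) : List (Int × Int) :=
  let r := p.2 - |p.1.2 - y|
  if 0 ≤ r then acc ++ [(p.1.1 - r, 1), (p.1.1 + r + 1, -1)] else acc

def pvSweepStep (st : Int × Int × Int) (e : Int × Int) : Int × Int × Int :=
  let o := if st.2.1 = 0 then e.1 else st.2.2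
  let a := st.2.1 + e.2
  (if a = 0 then st.1 + (e.1 - o) else st.1, a, o)

def phase1_alt (data : List (Int × Int × Int × Int)) (y : Int) : Int :=
  let sb := data.foldl pvSensorStepB (PySem.Dict.empty, PySem.Set.empty)
  let events := sb.1.items.foldl (pvEvStep y) []
  let sw := (PySem.List.sorted2 events Prod.fst Prod.snd).foldl pvSweepStep (0, 0, 0)
  sw.1 - (sb.2.countP (fun p => p.2 == y) : Int)

-- ===== PRECONDITION & SPEC =====
-- Pre_phase1 excludes exactly the inputs where Python A raises IndexError (B returns a value there,
-- 0 minus the number of distinct beacons on row y): the inputs where no sensor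
-- (taking, per sensor position, the beacon of its LAST entry, as the dict overwrite does) covers any
-- cell of row y, so that A's segment list is empty and `current[1]` indexes an empty list.
def Pre_phase1 (data : List (Int × Int × Int × Int)) (y : Int) : Prop :=
  ∃ i, ∃ _ : i < data.length,
    (|(data.getD i (0,0,0,0)).2.1 - y| ≤
       |(data.getD i (0,0,0,0)).1 - (data.getD i (0,0,0,0)).2.2.1| +
       |(data.getD i (0,0,0,0)).2.1 - (data.getD i (0,0,0,0)).2.2.2|) ∧
    ∀ j, ∀ _ : j < data.length, i < j →
      ¬((data.getD j (0,0,0,0)).1 = (data.getD i (0,0,0,0)).1 ∧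
        (data.getD j (0,0,0,0)).2.1 = (data.getD i (0,0,0,0)).2.1)
instance (data : List (Int × Int × Int × Int)) (y : Int) : Decidable (Pre_phase1 data y) := by
  unfold Pre_phase1; infer_instance

def pvWitness_phase1 : (List (Int × Int × Int × Int)) × Int := ([(0, 0, 0, 0)], 0)

def Spec_phase1 (data : List (Int × Int × Int × Int)) (y : Int) (out : Int) : Prop := out = phase1_alt data y
instance (data : List (Int × Int × Int × Int)) (y : Int) (out : Int) : Decidable (Spec_phase1 data y out) := by
  unfold Spec_phase1; infer_instance

-- ===== CLAIM (what is proved, stated in full; the proofs are below) =====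
def Claim_equal_phase1 : Prop := ∀ (data : List (Int × Int × Int × Int)) (y : Int), Dom_phase1 data y → Pre_phase1 data y → Spec_phase1 data y (phase1 data y)

-- ===== LEMMAS AND PROOFS =====

-- lexicographic ≤ on pairs, the order `sorted` leaves the lists in
def pvPLe (p q : Int × Int) : Prop := p.1 < q.1 ∨ (p.1 = q.1 ∧ p.2 ≤ q.2)

-- the Bool comparison sorted2 … Prod.fst Prod.snd uses
def pvBef (a b : Int × Int) : Bool := decide (a.1 < b.1) || (!decide (b.1 < a.1) && decide (a.2 < b.2))

def pvEvt (q : Int × Int) : List (Int × Int) := [(q.1, 1), (q.2 + 1, -1)]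

-- A's merge loop, from a current interval [c0, c1], as a recursion
def pvMergeGo (res c0 c1 : Int) : List (Int × Int) → Int
  | [] => res + (c1 - c0 + 1)
  | q :: t =>
      if c1 < q.1 then pvMergeGo (res + (c1 - c0 + 1)) q.1 q.2 t
      else if c1 < q.2 then pvMergeGo res c0 q.2 t
      else pvMergeGo res c0 c1 t

-- merge continuation: P = pending close positions of the sweep ([] = no interval open yet)
def pvMcont (P : List Int) (res c0 c1 : Int) (s : List (Int × Int)) : Int :=
  match P, s with
  | [], [] => res
  | [], q :: t => pvMergeGo res q.1 q.2 t
  | _ :: _, _ => pvMergeGo res c0 c1 s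

theorem pvPLe_refl (a : Int × Int) : pvPLe a a := Or.inr ⟨rfl, le_refl _⟩

theorem pvPLe_trans {a b c : Int × Int} (h1 : pvPLe a b) (h2 : pvPLe b c) : pvPLe a c := by
  unfold pvPLe at *; omega

theorem pvBef_true {a b : Int × Int} (h : pvBef a b = true) : pvPLe a b := by
  simp [pvBef] at h; unfold pvPLe; omega

theorem pvBef_false {a b : Int × Int} (h : pvBef a b = false) : pvPLe b a := by
  simp [pvBef] at h; unfold pvPLe; omega

theorem pvInsertBy_pairwise (x : Int × Int) (ys : List (Int × Int)) (h : ys.Pairwise pvPLe) :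
    (PySem.List.insertBy pvBef x ys).Pairwise pvPLe := by
  induction ys with
  | nil => simp [PySem.List.insertBy]
  | cons y ys ih =>
    rw [List.pairwise_cons] at h
    by_cases hb : pvBef x y = true
    · rw [show PySem.List.insertBy pvBef x (y :: ys) = x :: y :: ys from by
        simp [PySem.List.insertBy, hb]]
      refine List.pairwise_cons.mpr ⟨?_, List.pairwise_cons.mpr h⟩
      intro z hz
      rcases List.mem_cons.mp hz with rfl | hz'
      · exact pvBef_true hb
      · exact pvPLe_trans (pvBef_true hb) (h.1 z hz')
    · rw [show PySem.List.insertBy pvBef x (y :: ys) = y :: PySem.List.insertBy pvBef x ys from by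
        simp [PySem.List.insertBy, hb]]
      refine List.pairwise_cons.mpr ⟨?_, ih h.2⟩
      intro z hz
      rcases (PySem.List.mem_insertBy pvBef x z ys).mp hz with rfl | hz'
      · exact pvBef_false (by simpa using hb)
      · exact h.1 z hz'


theorem pvFoldlInsert_pairwise (xs : List (Int × Int)) (acc : List (Int × Int))
    (h : acc.Pairwise pvPLe) :
    (xs.foldl (fun acc x => PySem.List.insertBy pvBef x acc) acc).Pairwise pvPLe := by
  induction xs generalizing acc with
  | nil => exact h
  | cons x xs ih => exact ih _ (pvInsertBy_pairwise x acc h)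

theorem pvSorted2_pairwise (xs : List (Int × Int)) :
    (PySem.List.sorted2 xs Prod.fst Prod.snd).Pairwise pvPLe := by
  have hrw : PySem.List.sorted2 xs Prod.fst Prod.snd =
      xs.foldl (fun acc x => PySem.List.insertBy pvBef x acc) [] := rfl
  rw [hrw]
  exact pvFoldlInsert_pairwise xs [] (by simp)


theorem pvMergeFold (s : List (Int × Int)) (res c0 c1 : Int) :
    pvFinish (s.foldl pvMStep (res, some (c0, c1))) = pvMergeGo res c0 c1 s := by
  induction s generalizing res c0 c1 with
  | nil => simp [pvFinish, pvMergeGo]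
  | cons q t ih =>
    obtain ⟨qa, qb⟩ := q
    rw [List.foldl_cons]
    by_cases h1 : c1 < qa
    · rw [show pvMStep (res, some (c0, c1)) (qa, qb) = (res + (c1 - c0 + 1), some (qa, qb)) from by
        simp [pvMStep, h1]]
      rw [ih]
      simp [pvMergeGo, h1]
    · by_cases h2 : c1 < qb
      · rw [show pvMStep (res, some (c0, c1)) (qa, qb) = (res, some (c0, qb)) from by
          simp [pvMStep, h1, h2]]
        rw [ih]
        simp [pvMergeGo, h1, h2]
      · rw [show pvMStep (res, some (c0, c1)) (qa, qb) = (res, some (c0, c1)) from by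
          simp [pvMStep, h1, h2]]
        rw [ih]
        simp [pvMergeGo, h1, h2]


theorem pvBeaconFold (y : Int) (l : List (Int × Int)) (r : Int) :
    l.foldl (fun r p => if p.2 = y then r - 1 else r) r = r - (l.countP (fun p => p.2 == y) : Int) := by
  induction l generalizing r with
  | nil => simp
  | cons p l ih =>
    rw [List.foldl_cons, ih]
    by_cases hp : p.2 = y
    · simp [hp]
      omega
    · simp [hp]


theorem pvEvents_eq (y : Int) (items : List ((Int × Int) × Int)) (acc : List (Int × Int)) :
    items.foldl (pvEvStep y) (acc.flatMap pvEvt) = (items.foldl (pvSegStep y) acc).flatMap pvEvt := by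
  induction items generalizing acc with
  | nil => rfl
  | cons p items ih =>
    rw [List.foldl_cons, List.foldl_cons]
    have hstep : pvEvStep y (acc.flatMap pvEvt) p = (pvSegStep y acc p).flatMap pvEvt := by
      unfold pvEvStep pvSegStep
      by_cases hc : 0 ≤ p.2 - |p.1.2 - y|
      · rw [if_pos hc, if_pos (by omega)]
        rw [List.flatMap_append]
        simp only [List.flatMap_cons, List.flatMap_nil, pvEvt, List.append_nil]
        rw [show p.1.1 - (p.2 - |p.1.2 - y|) = p.1.1 - p.2 + |p.1.2 - y| from by omega,
          show p.1.1 + (p.2 - |p.1.2 - y|) + 1 = p.1.1 + p.2 - |p.1.2 - y| + 1 from by omega]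
      · rw [if_neg hc, if_neg (by omega)]
    rw [hstep]
    exact ih _


theorem pvSegs_valid (y : Int) (items : List ((Int × Int) × Int)) (acc : List (Int × Int))
    (h : ∀ q ∈ acc, q.1 ≤ q.2) : ∀ q ∈ items.foldl (pvSegStep y) acc, q.1 ≤ q.2 := by
  induction items generalizing acc with
  | nil => exact h
  | cons p items ih =>
    rw [List.foldl_cons]
    refine ih _ ?_
    intro q hq
    unfold pvSegStep at hq
    by_cases hc : p.1.1 - p.2 + |p.1.2 - y| ≤ p.1.1 + p.2 - |p.1.2 - y|
    · rw [if_pos hc] at hq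
      rcases List.mem_append.mp hq with hq' | hq'
      · exact h q hq'
      · rcases List.mem_singleton.mp hq' with rfl
        simpa using hc
    · rw [if_neg hc] at hq
      exact h q hq


theorem pvMain (E : List (Int × Int)) (P : List Int) (s : List (Int × Int)) (res c0 c1 : Int)
    (hpwE : E.Pairwise pvPLe)
    (hperm : E.Perm (P.map (fun p => (p, -1)) ++ s.flatMap pvEvt))
    (hpws : s.Pairwise pvPLe) (hval : ∀ q ∈ s, q.1 ≤ q.2)
    (hbd : ∀ p ∈ P, p ≤ c1 + 1) (hmem : P ≠ [] → (c1 + 1) ∈ P) :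
    (E.foldl pvSweepStep (res, (P.length : Int), c0)).1 = pvMcont P res c0 c1 s := by
  induction E generalizing P s res c0 c1 with
  | nil =>
    have h0 : P.map (fun p => (p, -1)) ++ s.flatMap pvEvt = [] := hperm.symm.eq_nil
    rcases List.append_eq_nil_iff.mp h0 with ⟨hP0, hs0⟩
    have hP : P = [] := by simpa using hP0
    have hs : s = [] := by
      cases s with
      | nil => rfl
      | cons q t => simp [pvEvt] at hs0
    subst hP; subst hs
    simp [pvMcont]
  | cons e E ih =>
    obtain ⟨hhead, hpwE'⟩ := List.pairwise_cons.mp hpwE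
    have hmemE : ∀ x ∈ (P.map (fun p => (p, -1)) ++ s.flatMap pvEvt), pvPLe e x := by
      intro x hx
      rcases List.mem_cons.mp (hperm.mem_iff.mpr hx) with rfl | h'
      · exact pvPLe_refl x
      · exact hhead x h'
    have heRHS : e ∈ P.map (fun p => (p, -1)) ++ s.flatMap pvEvt :=
      hperm.mem_iff.mp List.mem_cons_self
    rw [List.foldl_cons]
    rcases List.mem_append.mp heRHS with heP | heS
    · -- e is a pending close (p, -1), p ∈ P
      obtain ⟨p, hpP, rfl⟩ := List.mem_map.mp heP
      have hPne : P ≠ [] := by rintro rfl; simp at hpP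
      have hc1P : (c1 + 1) ∈ P := hmem hPne
      have hple : p ≤ c1 + 1 := hbd p hpP
      have hpmin : ∀ x ∈ P, p ≤ x := by
        intro x hx
        have := hmemE (x, -1) (List.mem_append_left _ (List.mem_map.mpr ⟨x, hx, rfl⟩))
        unfold pvPLe at this; simp at this; omega
      have hlenpos : 0 < P.length := List.length_pos_of_ne_nil hPne
      have hlen0 : ((P.length : Int)) ≠ 0 := by exact_mod_cast Nat.pos_iff_ne_zero.mp hlenpos
      rcases Nat.lt_or_ge 1 P.length with hbig | hone
      · -- at least two pending closes: active stays positive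
        have hstep : pvSweepStep (res, (P.length : Int), c0) (p, -1) =
            (res, (P.length : Int) + -1, c0) := by
          simp only [pvSweepStep]
          rw [if_neg hlen0, if_neg (by omega)]
        rw [hstep]
        have hpermE : E.Perm ((P.erase p).map (fun p => (p, -1)) ++ s.flatMap pvEvt) := by
          have h1 : (P.map (fun p => (p, -1))).Perm ((p, -1) :: (P.erase p).map (fun p => (p, -1))) :=
            (List.perm_cons_erase hpP).map _
          have h2 : ((p, -1) :: E).Perm ((p, -1) :: ((P.erase p).map (fun p => (p, -1)) ++ s.flatMap pvEvt)) :=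
            hperm.trans (h1.append_right _)
          exact h2.cons_inv
        have hbd' : ∀ x ∈ P.erase p, x ≤ c1 + 1 := fun x hx => hbd x (List.mem_of_mem_erase hx)
        have hmem' : P.erase p ≠ [] → (c1 + 1) ∈ P.erase p := by
          intro _
          by_cases hpc : p = c1 + 1
          · have hall : ∀ x ∈ P, x = c1 + 1 := fun x hx => le_antisymm (hbd x hx) (hpc ▸ hpmin x hx)
            have hlen' : 0 < (P.erase p).length := by
              rw [List.length_erase_of_mem hpP]; omega
            obtain ⟨x, hx⟩ := List.exists_mem_of_length_pos hlen'
            have := hall x (List.mem_of_mem_erase hx)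
            rwa [this] at hx
          · exact (List.mem_erase_of_ne (fun h => hpc h.symm)).mpr hc1P
        have hcast : (P.length : Int) + -1 = ((P.erase p).length : Int) := by
          rw [List.length_erase_of_mem hpP]; omega
        rw [hcast]
        rw [ih (P.erase p) s res c0 c1 hpwE' hpermE hpws hval hbd' hmem']
        have hne' : P.erase p ≠ [] := by
          have : 0 < (P.erase p).length := by rw [List.length_erase_of_mem hpP]; omega
          exact List.ne_nil_of_length_pos this
        obtain ⟨x, xs, hPx⟩ := List.exists_cons_of_ne_nil hne'
        obtain ⟨x0, xs0, hP0⟩ := List.exists_cons_of_ne_nil hPne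
        rw [hPx, hP0]
        rfl
      · -- exactly one pending close: it is c1+1, the interval [c0,c1] closes
        have hP1 : P = [c1 + 1] := by
          have : P.length = 1 := by omega
          obtain ⟨x, hx⟩ := List.length_eq_one_iff.mp this
          rw [hx] at hc1P
          simp at hc1P
          rw [hx, hc1P]
        subst hP1
        have hp' : p = c1 + 1 := by simpa using hpP
        subst hp'
        have hstep : pvSweepStep (res, ((1 : Nat) : Int), c0) (c1 + 1, -1) =
            (res + (c1 + 1 - c0), 0, c0) := by
          simp only [pvSweepStep]
          norm_num
        simp only [List.length_cons, List.length_nil] at *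
        rw [hstep]
        have hpermE : E.Perm (([] : List Int).map (fun p => (p, -1)) ++ s.flatMap pvEvt) := by
          simpa using hperm.cons_inv
        have := ih [] s (res + (c1 + 1 - c0)) c0 c1 hpwE' hpermE hpws hval (by simp) (by simp)
        simp only [List.length_nil, Nat.cast_zero] at this
        rw [this]
        cases s with
        | nil => simp [pvMcont, pvMergeGo]; omega
        | cons q0 t =>
          have hq0 : c1 < q0.1 := by
            have := hmemE (q0.1, 1) (List.mem_append_right _
              (List.mem_flatMap.mpr ⟨q0, List.mem_cons_self, by simp [pvEvt]⟩))
            unfold pvPLe at this; simp at this; omega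
          show pvMergeGo (res + (c1 + 1 - c0)) q0.1 q0.2 t = pvMergeGo res c0 c1 (q0 :: t)
          rw [show pvMergeGo res c0 c1 (q0 :: t) = pvMergeGo (res + (c1 - c0 + 1)) q0.1 q0.2 t from by
            simp [pvMergeGo, hq0]]
          rw [show res + (c1 + 1 - c0) = res + (c1 - c0 + 1) from by omega]
    · -- e comes from a segment
      obtain ⟨q, hqS, hqe⟩ := List.mem_flatMap.mp heS
      rcases (show e = (q.1, 1) ∨ e = (q.2 + 1, -1) from by
        simpa [pvEvt] using hqe) with rfl | rfl
      · -- an open event (q.1, 1); it must be the first segment's left end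
        cases s with
        | nil => simp at hqS
        | cons q0 t =>
          have hvq0 : q0.1 ≤ q0.2 := hval q0 List.mem_cons_self
          have hq01 : q.1 = q0.1 := by
            have h1 := hmemE (q0.1, 1) (List.mem_append_right _
              (List.mem_flatMap.mpr ⟨q0, List.mem_cons_self, by simp [pvEvt]⟩))
            have h2 : q0.1 ≤ q.1 := by
              rcases List.mem_cons.mp hqS with rfl | hq't
              · omega
              · have := (List.pairwise_cons.mp hpws).1 q hq't
                unfold pvPLe at this; omega
            unfold pvPLe at h1; simp at h1; omega
          have hpwt : t.Pairwise pvPLe := (List.pairwise_cons.mp hpws).2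
          have hvalt : ∀ r ∈ t, r.1 ≤ r.2 := fun r hr => hval r (List.mem_cons_of_mem _ hr)
          rcases P with _ | ⟨p0, P1⟩
          · -- no pending interval: a fresh interval [q0.1, q0.2] opens
            have hstep : pvSweepStep (res, ((0 : Nat) : Int), c0) (q.1, 1) =
                (res, 1, q.1) := by
              simp only [pvSweepStep]
              norm_num
            simp only [List.length_nil] at *
            rw [hstep]
            rw [hq01] at hperm
            have hpermE : E.Perm ([q0.2 + 1].map (fun p => (p, -1)) ++ t.flatMap pvEvt) := by
              have h0 : ((q0.1, (1:Int)) :: E).Perm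
                  ((q0.1, (1:Int)) :: ((q0.2 + 1, -1) :: t.flatMap pvEvt)) := by
                simpa [pvEvt] using hperm
              simpa using h0.cons_inv
            have := ih [q0.2 + 1] t res q.1 q0.2 hpwE' hpermE hpwt hvalt
              (by intro x hx; simp at hx; omega) (by simp)
            simp only [List.length_cons, List.length_nil] at this
            rw [show ((1 : Nat) : Int) = (1 : Int) from rfl] at this
            rw [this]
            show pvMergeGo res q.1 q0.2 t = pvMergeGo res q0.1 q0.2 t
            rw [hq01]
          · -- an interval is open: the new segment attaches to it (q.1 ≤ c1)
            have hc1P : c1 + 1 ∈ p0 :: P1 := hmem (by simp)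
            have hq0le : q0.1 ≤ c1 := by
              have := hmemE (c1 + 1, -1) (List.mem_append_left _
                (List.mem_map.mpr ⟨c1 + 1, hc1P, rfl⟩))
              unfold pvPLe at this; simp at this; omega
            have hlen0 : (((p0 :: P1).length : Int)) ≠ 0 := by
              rw [List.length_cons]; push_cast; omega
            have hstep : pvSweepStep (res, (((p0 :: P1).length : Nat) : Int), c0) (q.1, 1) =
                (res, ((p0 :: P1).length : Int) + 1, c0) := by
              simp only [pvSweepStep]
              rw [if_neg hlen0, if_neg (by omega)]
            rw [hstep]
            have hpermE : E.Perm (((q0.2 + 1) :: p0 :: P1).map (fun p => (p, -1)) ++ t.flatMap pvEvt) := by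
              rw [hq01] at hperm
              have h0 : ((q0.1, (1:Int)) :: E).Perm
                  ((p0 :: P1).map (fun p => (p, -1)) ++ ((q0.1, 1) :: (q0.2 + 1, -1) :: t.flatMap pvEvt)) := by
                simpa [pvEvt] using hperm
              have h1 : ((p0 :: P1).map (fun p => (p, -1)) ++ ((q0.1, 1) :: (q0.2 + 1, -1) :: t.flatMap pvEvt)).Perm
                  ((q0.1, 1) :: ((p0 :: P1).map (fun p => (p, -1)) ++ ((q0.2 + 1, -1) :: t.flatMap pvEvt))) :=
                List.perm_middle
              have h3 := (h0.trans h1).cons_inv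
              refine h3.trans ?_
              refine List.perm_middle.trans (List.Perm.of_eq ?_)
              simp
            have hcast : ((p0 :: P1).length : Int) + 1 = ((((q0.2 + 1) :: p0 :: P1).length : Nat) : Int) := by
              simp only [List.length_cons]; push_cast; omega
            rw [hcast]
            rcases le_total c1 q0.2 with hmx | hmx
            · have := ih ((q0.2 + 1) :: p0 :: P1) t res c0 q0.2 hpwE' hpermE hpwt hvalt
                (by intro x hx; rcases List.mem_cons.mp hx with rfl | hx'
                    · omega
                    · have := hbd x hx'; omega)
                (by intro _; exact List.mem_cons_self)
              rw [this]
              show pvMergeGo res c0 q0.2 t = pvMergeGo res c0 c1 (q0 :: t)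
              simp only [pvMergeGo]
              rw [if_neg (by omega)]
              by_cases hlt : c1 < q0.2
              · rw [if_pos hlt]
              · rw [if_neg hlt, show c1 = q0.2 from by omega]
            · have := ih ((q0.2 + 1) :: p0 :: P1) t res c0 c1 hpwE' hpermE hpwt hvalt
                (by intro x hx; rcases List.mem_cons.mp hx with rfl | hx'
                    · omega
                    · exact hbd x hx')
                (by intro _; exact List.mem_cons_of_mem _ hc1P)
              rw [this]
              show pvMergeGo res c0 c1 t = pvMergeGo res c0 c1 (q0 :: t)
              simp only [pvMergeGo]
              rw [if_neg (by omega), if_neg (by omega)]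
      · -- a close event of a still-unopened segment cannot be minimal
        exfalso
        have h1 := hmemE (q.1, 1) (List.mem_append_right _
          (List.mem_flatMap.mpr ⟨q, hqS, by simp [pvEvt]⟩))
        have h2 := hval q hqS
        unfold pvPLe at h1; simp at h1; omega

-- ===== VERDICT (by name: the statement is the Claim_ definition above) =====
theorem phase1_spec : Claim_equal_phase1 := by
  intro data y _ _
  unfold Spec_phase1
  have hsens : pvSensorStep = pvSensorStepB := by
    funext st e
    obtain ⟨sx, sy, bx, b_y⟩ := e
    rfl
  simp only [phase1, phase1_alt, hsens]
  generalize data.foldl pvSensorStepB (PySem.Dict.empty, PySem.Set.empty) = sb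
  rw [pvBeaconFold]
  congr 1
  have hev : sb.1.items.foldl (pvEvStep y) [] =
      (sb.1.items.foldl (pvSegStep y) []).flatMap pvEvt := by
    simpa using pvEvents_eq y sb.1.items []
  have hpermS : (PySem.List.sorted2 (sb.1.items.foldl (pvSegStep y) []) Prod.fst Prod.snd).Perm
      (sb.1.items.foldl (pvSegStep y) []) := PySem.List.sorted2_perm _ _ _ _
  have hperm : (PySem.List.sorted2 (sb.1.items.foldl (pvEvStep y) []) Prod.fst Prod.snd).Perm
      (([] : List Int).map (fun p => (p, -1)) ++
        (PySem.List.sorted2 (sb.1.items.foldl (pvSegStep y) []) Prod.fst Prod.snd).flatMap pvEvt) := by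
    simp only [List.map_nil, List.nil_append]
    refine (PySem.List.sorted2_perm _ _ _ _).trans ?_
    rw [hev]
    exact List.Perm.flatMap hpermS.symm (fun a _ => List.Perm.refl _)
  have hval : ∀ q ∈ PySem.List.sorted2 (sb.1.items.foldl (pvSegStep y) []) Prod.fst Prod.snd,
      q.1 ≤ q.2 := by
    intro q hq
    exact pvSegs_valid y sb.1.items [] (by simp) q (hpermS.mem_iff.mp hq)
  have hmain := pvMain (PySem.List.sorted2 (sb.1.items.foldl (pvEvStep y) []) Prod.fst Prod.snd)
    [] (PySem.List.sorted2 (sb.1.items.foldl (pvSegStep y) []) Prod.fst Prod.snd) 0 0 0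
    (pvSorted2_pairwise _) hperm (pvSorted2_pairwise _) hval (by simp) (by simp)
  simp only [List.length_nil, Nat.cast_zero] at hmain
  rw [hmain]
  cases hss : PySem.List.sorted2 (sb.1.items.foldl (pvSegStep y) []) Prod.fst Prod.snd with
  | nil => simp [pvFinish, pvMcont]
  | cons q t =>
    obtain ⟨qa, qb⟩ := q
    rw [List.foldl_cons]
    show pvFinish (t.foldl pvMStep (pvMStep (0, none) (qa, qb))) = _
    rw [show pvMStep (0, none) (qa, qb) = ((0 : Int), some (qa, qb)) from rfl]
    exact pvMergeFold t 0 qa qb
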